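-- pv_equiv track=rewrite | github.com/Nileshwar-Paul-au17/Python | oct/good_array_index.py | check
-- ===== SOURCE A (Python) =====
-- def check(n,list1):
--     c=0
--     j=n-1
--     for i in range(0,n):
--         for j in range(n-1,-1,-1):
--             if j>i and list1[j]<list1[i]:
--                 c =c +1
--                 break
--     return c
-- ===== SOURCE B (Python) =====
-- def check(n, list1):
--     # Single backward pass: an index i counts iff the minimum of the
--     # elements after it (within the first n) is smaller than list1[i].
--     c = 0
--     m = None
--     for i in range(n - 1, -1, -1):
--         x = list1[i]
--         if m is not None and m < x:
--             c += 1
--         if m is None or x < m: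
--             m = x
--     return c
-- ===== Notes on version B (the rewrite author's own statement) =====
-- stated objective: faster
-- what changed: A's nested scan (for each i, rescan the whole list backwards for a later smaller element) is replaced by a single backward pass that tracks the running suffix minimum and counts indices it beats.
-- outside the precondition, e.g. on check(1, []): A returns 0, B raises IndexError
import Mathlib
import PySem

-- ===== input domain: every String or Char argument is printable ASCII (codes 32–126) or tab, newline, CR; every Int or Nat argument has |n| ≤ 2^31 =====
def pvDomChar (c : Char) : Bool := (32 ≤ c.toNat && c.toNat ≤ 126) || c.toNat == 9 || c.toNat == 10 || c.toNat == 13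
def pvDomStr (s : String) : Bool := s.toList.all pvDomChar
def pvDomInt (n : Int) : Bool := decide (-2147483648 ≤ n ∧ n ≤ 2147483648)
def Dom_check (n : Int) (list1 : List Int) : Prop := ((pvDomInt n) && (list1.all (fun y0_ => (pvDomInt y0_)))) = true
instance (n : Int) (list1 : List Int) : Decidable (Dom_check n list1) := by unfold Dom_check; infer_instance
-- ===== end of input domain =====

-- B replaces A's O(n^2) nested scan by one backward pass tracking the suffix minimum (objective: faster).

-- ===== PORT A =====
-- inner 'for j in range(n-1,-1,-1)' with break: returns whether the break fired
def checkInner (list1 : List Int) (i : Int) : List Int → Bool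
  | [] => false
  | j :: js =>
    if j > i ∧ PySem.List.pyGetD list1 j 0 < PySem.List.pyGetD list1 i 0 then true
    else checkInner list1 i js

def check (n : Int) (list1 : List Int) : Int :=
  (PySem.List.pyRange 0 n 1).foldl
    (fun c i => if checkInner list1 i (PySem.List.pyRange (n - 1) (-1) (-1)) then c + 1 else c) 0

-- ===== PORT B =====
-- the loop body of Source B: state (c, m) = (count so far, minimum of the suffix already seen)
def altStep (list1 : List Int) (s : Int × Option Int) (i : Int) : Int × Option Int :=
  let x := PySem.List.pyGetD list1 i 0
  let c := match s.2 with
    | some m => if m < x then s.1 + 1 else s.1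
    | none => s.1
  let m := match s.2 with
    | some m => if x < m then some x else some m
    | none => some x
  (c, m)

def check_alt (n : Int) (list1 : List Int) : Int :=
  ((PySem.List.pyRange (n - 1) (-1) (-1)).foldl (altStep list1) (0, none)).1

-- ===== PRECONDITION & SPEC =====
-- Pre_ excludes inputs where indexing raises IndexError: A raises for n ≥ 2 with n > len(list1),
-- B for n ≥ 1 with n > len(list1); the only excluded input where A still returns is (1, []) (A
-- returns 0 because its guard 'j > i' short-circuits before indexing; B's natural pass raises there).
def Pre_check (n : Int) (list1 : List Int) : Prop := n ≤ (list1.length : Int)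
instance (n : Int) (list1 : List Int) : Decidable (Pre_check n list1) := by unfold Pre_check; infer_instance
def pvWitness_check : Int × List Int := (3, [5, 1, 4])

def Spec_check (n : Int) (list1 : List Int) (out : Int) : Prop := out = check_alt n list1
instance (n : Int) (list1 : List Int) (out : Int) : Decidable (Spec_check n list1 out) := by unfold Spec_check; infer_instance

-- ===== CLAIM (what is proved, stated in full; the proofs are below) =====
def Claim_equal_check : Prop := ∀ (n : Int) (list1 : List Int), Dom_check n list1 → Pre_check n list1 → Spec_check n list1 (check n list1)

-- ===== LEMMAS AND PROOFS =====

-- common vocabulary: g i = list1[i] (total form), the predicate "some later index < n holds a smaller value"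
def gN (list1 : List Int) (i : Nat) : Int := PySem.List.pyGetD list1 (i : Int) 0

def hasSmallerAfter (g : Nat → Int) (k i : Nat) : Bool :=
  (List.range k).any (fun j => decide (i < j) && decide (g j < g i))

def optLtB : Option Int → Int → Bool
  | none, _ => false
  | some v, x => decide (v < x)

-- count for B's invariant: i < K counts if the pending minimum m beats g i or a later index < K does
def cntm (g : Nat → Int) (K : Nat) (m : Option Int) : Nat :=
  (List.range K).countP (fun i => optLtB m (g i) || hasSmallerAfter g K i)

theorem optLtB_update (m : Option Int) (y x : Int) :
    (decide (y < x) || optLtB m x) =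
      optLtB (match m with
              | some v => if y < v then some y else some v
              | none => some y) x := by
  cases m with
  | none => simp [optLtB]
  | some v =>
    by_cases h : y < v <;> simp [optLtB, h] <;> omega

theorem hasSmallerAfter_succ (g : Nat → Int) (K i : Nat) (hi : i < K) :
    hasSmallerAfter g (K + 1) i =
      (decide (g K < g i) || hasSmallerAfter g K i) := by
  simp [hasSmallerAfter, List.range_succ, hi, Bool.or_comm]

theorem cntm_succ (g : Nat → Int) (K : Nat) (m : Option Int) :
    cntm g (K + 1) m =
      cntm g K (match m with
                | some v => if g K < v then some (g K) else some v
                | none => some (g K)) +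
        (if optLtB m (g K) then 1 else 0) := by
  unfold cntm
  rw [List.range_succ, List.countP_append]
  have h2 : (List.countP (fun i => optLtB m (g i) || hasSmallerAfter g (K+1) i) [K])
      = (if optLtB m (g K) then 1 else 0) := by
    have : hasSmallerAfter g (K + 1) K = false := by
      simp [hasSmallerAfter]
      omega
    simp [List.countP, List.countP.go, this]
  rw [h2]
  congr 1
  apply List.countP_congr
  intro i hi
  have hiK : i < K := List.mem_range.mp hi
  rw [hasSmallerAfter_succ g K i hiK, ← optLtB_update m (g K) (g i)]
  cases hb : optLtB m (g i) <;> cases hc : hasSmallerAfter g K i <;>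
    cases hd : decide (g K < g i) <;> simp_all

-- B's fold satisfies the invariant: result count = start count + cntm
theorem altFold_eq (list1 : List Int) (K : Nat) (c : Int) (m : Option Int) :
    ((PySem.List.pyRange ((K : Int) - 1) (-1) (-1)).foldl (altStep list1) (c, m)).1
      = c + (cntm (gN list1) K m : Int) := by
  induction K generalizing c m with
  | zero =>
    rw [PySem.List.pyRange_neg_one_eq_nil (by omega)]
    simp [cntm]
  | succ K ih =>
    have hc : ((K + 1 : Nat) : Int) - 1 = (K : Int) := by push_cast; ring
    rw [hc, PySem.List.pyRange_neg_one_cons (by omega), List.foldl_cons, ih, cntm_succ]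
    have hx : altStep list1 (c, m) (K : Int) =
        ((match m with | some v => if v < gN list1 K then c + 1 else c | none => c),
         (match m with
          | some v => if gN list1 K < v then some (gN list1 K) else some v
          | none => some (gN list1 K))) := by
      cases m <;> rfl
    rw [hx]
    cases m with
    | none => simp [optLtB]
    | some v =>
      by_cases h : gN list1 K < v <;> by_cases h2 : v < gN list1 K <;>
        simp [h, h2, optLtB] <;> omega

-- A's inner loop with break is an existence test over the countdown range
theorem checkInner_eq_any (list1 : List Int) (i : Int) (L : List Int) :
    checkInner list1 i L
      = L.any (fun j => decide (j > i) &&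
          decide (PySem.List.pyGetD list1 j 0 < PySem.List.pyGetD list1 i 0)) := by
  induction L with
  | nil => rfl
  | cons j js ih =>
    rw [List.any_cons]
    by_cases h1 : j > i
    · by_cases h2 : PySem.List.pyGetD list1 j 0 < PySem.List.pyGetD list1 i 0
      · simp [checkInner, h1, h2]
      · simp [checkInner, h1, h2, ih]
    · simp [checkInner, h1, ih]

theorem checkInner_iff (list1 : List Int) (K : Nat) (i : Nat) :
    checkInner list1 (i : Int) (PySem.List.pyRange ((K : Int) - 1) (-1) (-1))
      = hasSmallerAfter (gN list1) K i := by
  rw [checkInner_eq_any, Bool.eq_iff_iff]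
  simp only [hasSmallerAfter, List.any_eq_true, PySem.List.mem_pyRange_neg_one,
    List.mem_range, Bool.and_eq_true, decide_eq_true_eq, gN]
  constructor
  · rintro ⟨j, ⟨hj1, hj2⟩, hj3, hj4⟩
    obtain ⟨jn, rfl⟩ : ∃ jn : Nat, j = (jn : Int) := ⟨j.toNat, by omega⟩
    exact ⟨jn, by omega, by omega, hj4⟩
  · rintro ⟨jn, hj1, hj2, hj3⟩
    exact ⟨(jn : Int), ⟨by omega, by omega⟩, by omega, hj3⟩

-- A's outer fold is a countP over range K
theorem check_eq_cnt (list1 : List Int) (K : Nat) :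
    check (K : Int) list1 = (cntm (gN list1) K none : Int) := by
  unfold check
  rw [PySem.List.pyRange_zero_nat, List.foldl_map, PySem.List.foldl_count_if
    (fun k : Nat => checkInner list1 (k : Int) (PySem.List.pyRange ((K : Int) - 1) (-1) (-1)))]
  rw [zero_add]
  unfold cntm
  congr 1
  apply List.countP_congr
  intro i hi
  rw [checkInner_iff]
  simp [optLtB]

-- ===== VERDICT (by name: the statement is the Claim_ definition above) =====
theorem check_spec : Claim_equal_check := by
  intro n list1 _ _
  unfold Spec_check
  by_cases hn : n ≤ 0
  · unfold check check_alt
    rw [PySem.List.pyRange_one_eq_nil hn, PySem.List.pyRange_neg_one_eq_nil (by omega)]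
    rfl
  · obtain ⟨K, rfl⟩ : ∃ K : Nat, n = (K : Int) := ⟨n.toNat, by omega⟩
    rw [check_eq_cnt]
    unfold check_alt
    rw [altFold_eq, zero_add]
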